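-- pv_equiv track=rewrite | github.com/RafaFelisberto/MusicalAI | audio_analysis.py | classify_progression
-- ===== SOURCE A (Python) =====
-- from typing import Dict, List, Tuple
--
-- def classify_progression(chords1: List[str], chords2: List[str]) -> str:
--     """Classifica o tipo de progressão harmônica."""
--     # Análise simplificada de progressões comuns
--     common_progressions = {
--         ('C', 'F'): 'I-IV',
--         ('C', 'G'): 'I-V',
--         ('Am', 'F'): 'vi-IV',
--         ('F', 'G'): 'IV-V',
--         ('G', 'C'): 'V-I',
--         ('Am', 'C'): 'vi-I'
--     }
--
--     # Verifica se há progressões conhecidas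
--     for chord1 in chords1:
--         for chord2 in chords2:
--             # Remove sufixos para comparação básica
--             root1 = chord1.split('m')[0].split('7')[0].split('dim')[0]
--             root2 = chord2.split('m')[0].split('7')[0].split('dim')[0]
--
--             if (root1, root2) in common_progressions:
--                 return common_progressions[(root1, root2)]
--
--     return 'Progressão personalizada'
-- ===== SOURCE B (Python) =====
-- from typing import Dict, List, Tuple
--
-- def classify_progression(chords1: List[str], chords2: List[str]) -> str:
--     """Classifica o tipo de progressão harmônica (pré-computa as raízes relevantes de chords2)."""
--     common_progressions = {
--         ('C', 'F'): 'I-IV',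
--         ('C', 'G'): 'I-V',
--         ('Am', 'F'): 'vi-IV',
--         ('F', 'G'): 'IV-V',
--         ('G', 'C'): 'V-I',
--         ('Am', 'C'): 'vi-I'
--     }
--
--     def root(chord):
--         # prefix of the chord name before the first 'm' or '7'
--         for i, ch in enumerate(chord):
--             if ch in 'm7':
--                 return chord[:i]
--         return chord
--
--     # roots that can appear as the second element of a known progression
--     targets = {r2 for (_, r2) in common_progressions}
--
--     # distinct relevant roots of chords2, in first-occurrence order (at most len(targets) entries)
--     seen = []
--     for chord in chords2:
--         r = root(chord)
--         if r in targets and r not in seen: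
--             seen.append(r)
--
--     for chord in chords1:
--         r1 = root(chord)
--         for r2 in seen:
--             if (r1, r2) in common_progressions:
--                 return common_progressions[(r1, r2)]
--
--     return 'Progressão personalizada'
-- ===== Notes on version B (the rewrite author's own statement) =====
-- stated objective: faster
-- what changed: Instead of the O(n*m) nested scan over all chord pairs, B makes one pass over chords2 collecting the distinct roots that can complete a known progression (at most 3), then for each chord of chords1 scans only that tiny list, preserving A's first-match order.
import Mathlib
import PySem

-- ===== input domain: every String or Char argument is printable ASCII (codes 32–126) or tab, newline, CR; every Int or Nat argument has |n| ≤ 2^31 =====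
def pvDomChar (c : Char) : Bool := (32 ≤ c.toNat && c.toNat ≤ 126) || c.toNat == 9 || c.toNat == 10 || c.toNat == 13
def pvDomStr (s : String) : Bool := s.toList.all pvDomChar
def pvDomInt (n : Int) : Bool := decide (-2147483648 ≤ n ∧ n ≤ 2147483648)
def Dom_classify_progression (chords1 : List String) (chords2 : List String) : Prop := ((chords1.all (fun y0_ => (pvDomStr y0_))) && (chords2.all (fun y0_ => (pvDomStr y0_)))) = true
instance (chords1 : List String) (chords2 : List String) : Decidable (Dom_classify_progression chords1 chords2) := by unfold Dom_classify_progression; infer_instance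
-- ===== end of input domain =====

-- B replaces A's nested scan over all chord pairs by one pass over chords2 collecting the distinct
-- progression-completing roots, then a scan of that tiny list per chord of chords1 (objective: faster).

-- ===== PORT A =====
-- the literal dict common_progressions
def cpDictA : PySem.Dict (String × String) String :=
  PySem.Dict.ofList
    [ (("C", "F"), "I-IV"), (("C", "G"), "I-V"), (("Am", "F"), "vi-IV"),
      (("F", "G"), "IV-V"), (("G", "C"), "V-I"), (("Am", "C"), "vi-I") ]

-- chord.split('m')[0].split('7')[0].split('dim')[0]; split by a nonempty literal separator is
-- PySem.Chars.splitOn on .toList; the [0] never raises (split is never empty), ported as headD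
def rootA (chord : String) : String :=
  String.ofList ((PySem.Chars.splitOn
    (String.ofList ((PySem.Chars.splitOn
      (String.ofList ((PySem.Chars.splitOn chord.toList "m".toList).headD [])).toList
      "7".toList).headD [])).toList
    "dim".toList).headD [])

-- the inner 'for chord2 in chords2' loop: '(root1, root2) in d' is contains, 'd[(root1, root2)]'
-- under that test is get? (guarded, so it never raises)
def innerA (chord1 : String) : List String → Option String
  | [] => none
  | chord2 :: rest =>
    let root1 := rootA chord1
    let root2 := rootA chord2
    if PySem.Dict.contains cpDictA (root1, root2) then PySem.Dict.get? cpDictA (root1, root2)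
    else innerA chord1 rest

-- the outer 'for chord1 in chords1' loop
def outerA (chords2 : List String) : List String → Option String
  | [] => none
  | chord1 :: rest =>
    match innerA chord1 chords2 with
    | some v => some v
    | none => outerA chords2 rest

def classify_progression (chords1 : List String) (chords2 : List String) : String :=
  (outerA chords2 chords1).getD "Progressão personalizada"

-- ===== PORT B =====
def cpDictB : PySem.Dict (String × String) String :=
  PySem.Dict.ofList
    [ (("C", "F"), "I-IV"), (("C", "G"), "I-V"), (("Am", "F"), "vi-IV"),
      (("F", "G"), "IV-V"), (("G", "C"), "V-I"), (("Am", "C"), "vi-I") ]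

-- root: scan the chord, return the prefix before the first 'm' or '7'
def rootBgo : List Char → List Char
  | [] => []
  | ch :: rest => if ch = 'm' ∨ ch = '7' then [] else ch :: rootBgo rest

def rootB (chord : String) : String := String.ofList (rootBgo chord.toList)

-- targets = {r2 for (_, r2) in common_progressions}
def targetsB : List String := PySem.Set.ofList (cpDictB.items.map (fun kv => kv.1.2))

-- the 'for chord in chords2' pass building seen
def seenStep (acc : List String) (chord : String) : List String :=
  let r := rootB chord
  if r ∈ targetsB ∧ r ∉ acc then acc ++ [r] else acc

-- inner 'for r2 in seen' scan: '(r1, r2) in d' then 'd[(r1, r2)]' under the test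
def scanSeen (r1 : String) : List String → Option String
  | [] => none
  | r2 :: rest =>
    if PySem.Dict.contains cpDictB (r1, r2) then PySem.Dict.get? cpDictB (r1, r2)
    else scanSeen r1 rest

-- outer 'for chord in chords1' loop
def outerB (seen : List String) : List String → Option String
  | [] => none
  | chord :: rest =>
    let r1 := rootB chord
    match scanSeen r1 seen with
    | some v => some v
    | none => outerB seen rest

def classify_progression_alt (chords1 : List String) (chords2 : List String) : String :=
  let seen := List.foldl seenStep [] chords2
  (outerB seen chords1).getD "Progressão personalizada"

-- ===== PRECONDITION & SPEC =====
def Spec_classify_progression (chords1 : List String) (chords2 : List String) (out : String) : Prop := out = classify_progression_alt chords1 chords2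
instance (chords1 : List String) (chords2 : List String) (out : String) : Decidable (Spec_classify_progression chords1 chords2 out) := by unfold Spec_classify_progression; infer_instance

-- ===== CLAIM (what is proved, stated in full; the proofs are below) =====
def Claim_equal_classify_progression : Prop := ∀ (chords1 : List String) (chords2 : List String), Dom_classify_progression chords1 chords2 → Spec_classify_progression chords1 chords2 (classify_progression chords1 chords2)

-- ===== LEMMAS AND PROOFS =====

-- the two dict constants are the same table
theorem cpDictB_eq : cpDictB = cpDictA := rfl

-- unfolding equations of PySem.Chars.splitOn.go
theorem go_zero (sep l cur : List Char) (acc : List (List Char)) :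
    PySem.Chars.splitOn.go sep 0 l cur acc = ((cur.reverse ++ l) :: acc).reverse := by
  rw [PySem.Chars.splitOn.go]

theorem go_nil (sep cur : List Char) (acc : List (List Char)) (n : Nat) :
    PySem.Chars.splitOn.go sep (n+1) [] cur acc = (cur.reverse :: acc).reverse := by
  rw [PySem.Chars.splitOn.go]
  simp

theorem go_cons (sep cur : List Char) (acc : List (List Char)) (n : Nat) (c : Char) (rest : List Char) :
    PySem.Chars.splitOn.go sep (n+1) (c :: rest) cur acc =
      if sep.isPrefixOf (c :: rest) = true then
        PySem.Chars.splitOn.go sep n (List.drop sep.length (c :: rest)) [] (cur.reverse :: acc)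
      else PySem.Chars.splitOn.go sep n rest (c :: cur) acc := by
  rw [PySem.Chars.splitOn.go]

-- head of splitOn.go with a nonempty accumulator is the accumulator's bottom element
theorem go_headD_acc (sep : List Char) :
    ∀ (fuel : Nat) (l cur : List Char) (as : List (List Char)) (a : List Char),
      (PySem.Chars.splitOn.go sep fuel l cur (as ++ [a])).headD [] = a := by
  intro fuel
  induction fuel with
  | zero => intro l cur as a; simp [go_zero]
  | succ n ih =>
    intro l cur as a
    cases l with
    | nil => simp [go_nil]
    | cons c rest =>
      rw [go_cons]
      by_cases h : sep.isPrefixOf (c :: rest) = true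
      · rw [if_pos h]
        have := ih (List.drop sep.length (c :: rest)) [] (cur.reverse :: as) a
        simpa using this
      · rw [if_neg h]
        exact ih rest (c :: cur) as a

-- head of splitOn.go for a single-character separator: the prefix before its first occurrence
theorem go_headD_single (c : Char) :
    ∀ (fuel : Nat) (l cur : List Char), l.length < fuel →
      (PySem.Chars.splitOn.go [c] fuel l cur []).headD []
        = cur.reverse ++ l.takeWhile (· ≠ c) := by
  intro fuel
  induction fuel with
  | zero => intro l cur h; omega
  | succ n ih =>
    intro l cur h
    cases l with
    | nil => simp [go_nil]
    | cons x rest =>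
      rw [go_cons]
      by_cases hx : x = c
      · subst hx
        have hpre : [x].isPrefixOf (x :: rest) = true := by
          rw [List.isPrefixOf_iff_prefix]; exact ⟨rest, rfl⟩
        rw [if_pos hpre]
        have := go_headD_acc [x] n (List.drop [x].length (x :: rest)) [] [] cur.reverse
        simp only [List.nil_append] at this
        rw [this]
        simp
      · have hpre : ¬ ([c].isPrefixOf (x :: rest) = true) := by
          intro hc
          rcases (List.isPrefixOf_iff_prefix.mp hc) with ⟨t, ht⟩
          simp only [List.cons_append, List.nil_append, List.cons.injEq] at ht
          exact hx ht.1.symm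
        rw [if_neg hpre]
        rw [ih rest (x :: cur) (by simpa using Nat.lt_of_succ_lt_succ h)]
        simp [hx]

-- splitting by 'dim' is a no-op on a string without 'm'
theorem go_headD_dim :
    ∀ (fuel : Nat) (l cur : List Char), l.length < fuel → 'm' ∉ l →
      (PySem.Chars.splitOn.go "dim".toList fuel l cur []).headD [] = cur.reverse ++ l := by
  intro fuel
  induction fuel with
  | zero => intro l cur h; omega
  | succ n ih =>
    intro l cur h hm
    cases l with
    | nil => simp [go_nil]
    | cons x rest =>
      rw [go_cons]
      have hpre : ¬ (("dim".toList).isPrefixOf (x :: rest) = true) := by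
        intro hc
        have hp : "dim".toList <+: (x :: rest) := List.isPrefixOf_iff_prefix.mp hc
        exact hm (hp.subset (by decide))
      rw [if_neg hpre]
      rw [ih rest (x :: cur) (by simpa using Nat.lt_of_succ_lt_succ h)
        (fun hmem => hm (List.mem_cons_of_mem _ hmem))]
      simp

-- the head of splitOn, packaged
theorem splitOn_single_headD (c : Char) (l : List Char) :
    (PySem.Chars.splitOn l [c]).headD [] = l.takeWhile (· ≠ c) := by
  unfold PySem.Chars.splitOn
  rw [go_headD_single c (l.length + 1) l [] (Nat.lt_succ_self _)]
  simp

theorem splitOn_dim_headD (l : List Char) (hm : 'm' ∉ l) :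
    (PySem.Chars.splitOn l "dim".toList).headD [] = l := by
  unfold PySem.Chars.splitOn
  rw [go_headD_dim (l.length + 1) l [] (Nat.lt_succ_self _) hm]
  simp

-- rootBgo is the double takeWhile
theorem rootBgo_eq (l : List Char) :
    rootBgo l = (l.takeWhile (· ≠ 'm')).takeWhile (· ≠ '7') := by
  induction l with
  | nil => rfl
  | cons x rest ih =>
    by_cases hx : x = 'm' ∨ x = '7'
    · rcases hx with hx | hx <;> subst hx <;> simp [rootBgo]
    · rw [not_or] at hx
      simp [rootBgo, hx.1, hx.2, ih]

-- the two root computations agree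
theorem rootA_eq_rootB (chord : String) : rootA chord = rootB chord := by
  unfold rootA rootB
  rw [show "m".toList = ['m'] by decide, show "7".toList = ['7'] by decide]
  rw [splitOn_single_headD 'm']
  simp only [String.toList_ofList]
  rw [splitOn_single_headD '7']
  rw [splitOn_dim_headD _ (fun hmem => by
    have := List.mem_takeWhile_imp (List.takeWhile_subset _ hmem)
    simp at this)]
  rw [rootBgo_eq]

-- unfolding equations of the loops (definitional)
theorem innerA_cons (chord1 c : String) (rest : List String) :
    innerA chord1 (c :: rest) =
      (if PySem.Dict.contains cpDictA (rootA chord1, rootA c) then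
        PySem.Dict.get? cpDictA (rootA chord1, rootA c)
       else innerA chord1 rest) := rfl

theorem scanSeen_cons (r1 r : String) (rest : List String) :
    scanSeen r1 (r :: rest) =
      (if PySem.Dict.contains cpDictB (r1, r) then PySem.Dict.get? cpDictB (r1, r)
       else scanSeen r1 rest) := rfl

theorem outerA_cons (chords2 : List String) (c : String) (rest : List String) :
    outerA chords2 (c :: rest) = (match innerA c chords2 with
      | some v => some v
      | none => outerA chords2 rest) := rfl

theorem outerB_cons (seen : List String) (c : String) (rest : List String) :
    outerB seen (c :: rest) = (match scanSeen (rootB c) seen with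
      | some v => some v
      | none => outerB seen rest) := rfl

-- the loops written as findSome?
theorem innerA_eq_findSome (chord1 : String) (l : List String) :
    innerA chord1 l = l.findSome? (fun c2 => PySem.Dict.get? cpDictA (rootA chord1, rootA c2)) := by
  induction l with
  | nil => rfl
  | cons c rest ih =>
    rw [List.findSome?_cons, innerA_cons, ← ih, PySem.Dict.contains_eq_isSome_get?]
    cases PySem.Dict.get? cpDictA (rootA chord1, rootA c) <;> simp

theorem scanSeen_eq_findSome (r1 : String) (s : List String) :
    scanSeen r1 s = s.findSome? (fun r2 => PySem.Dict.get? cpDictB (r1, r2)) := by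
  induction s with
  | nil => rfl
  | cons r rest ih =>
    rw [List.findSome?_cons, scanSeen_cons, ← ih, PySem.Dict.contains_eq_isSome_get?]
    cases PySem.Dict.get? cpDictB (r1, r) <;> simp

-- a root outside targetsB never completes a known progression
theorem get?_none_of_not_target (r1 r : String) (hr : r ∉ targetsB) :
    PySem.Dict.get? cpDictB (r1, r) = none := by
  have ht : targetsB = ["F", "G", "C"] := by decide
  rw [ht] at hr
  simp only [List.mem_cons, List.not_mem_nil, or_false, not_or] at hr
  obtain ⟨hF, hG, hC⟩ := hr
  rw [PySem.Dict.get?_eq_none_iff_not_mem_keys]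
  have hk : cpDictB.keys = [("C", "F"), ("C", "G"), ("Am", "F"), ("F", "G"), ("G", "C"), ("Am", "C")] := by decide
  rw [hk]
  intro hmem
  simp only [List.mem_cons, List.not_mem_nil, or_false, Prod.mk.injEq] at hmem
  rcases hmem with ⟨_, h⟩ | ⟨_, h⟩ | ⟨_, h⟩ | ⟨_, h⟩ | ⟨_, h⟩ | ⟨_, h⟩ <;> simp_all

-- key invariant: scanning the seen-list built from chords2 equals scanning chords2 itself
theorem foldl_seen_findSome (r1 : String) :
    ∀ (l acc : List String),
      (List.foldl seenStep acc l).findSome? (fun r2 => PySem.Dict.get? cpDictB (r1, r2))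
        = (acc.findSome? (fun r2 => PySem.Dict.get? cpDictB (r1, r2))).or
            (l.findSome? (fun c => PySem.Dict.get? cpDictB (r1, rootB c))) := by
  intro l
  induction l with
  | nil => intro acc; simp
  | cons c rest ih =>
    intro acc
    rw [List.foldl_cons, List.findSome?_cons]
    by_cases h1 : rootB c ∈ targetsB ∧ rootB c ∉ acc
    · rw [show seenStep acc c = acc ++ [rootB c] by
        simp only [seenStep]; rw [if_pos h1]]
      rw [ih, List.findSome?_append]
      cases hx : acc.findSome? (fun r2 => PySem.Dict.get? cpDictB (r1, r2)) <;>
        cases hy : PySem.Dict.get? cpDictB (r1, rootB c) <;>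
          simp [hy]
    · rw [show seenStep acc c = acc by
        simp only [seenStep]; rw [if_neg h1]]
      rw [ih]
      by_cases hT : rootB c ∈ targetsB
      · have hacc : rootB c ∈ acc := by tauto
        cases hx : acc.findSome? (fun r2 => PySem.Dict.get? cpDictB (r1, r2)) with
        | some v => simp
        | none =>
          have hnone : PySem.Dict.get? cpDictB (r1, rootB c) = none :=
            List.findSome?_eq_none_iff.mp hx _ hacc
          simp [hnone]
      · simp [get?_none_of_not_target r1 _ hT]

-- per-chord agreement of the two inner scans
theorem innerA_eq_scanSeen (chord1 : String) (chords2 : List String) :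
    innerA chord1 chords2 = scanSeen (rootB chord1) (List.foldl seenStep [] chords2) := by
  have hfun : (fun c2 : String => PySem.Dict.get? cpDictA (rootA chord1, rootA c2))
      = (fun c : String => PySem.Dict.get? cpDictB (rootB chord1, rootB c)) := by
    funext c2
    rw [rootA_eq_rootB chord1, rootA_eq_rootB c2, cpDictB_eq]
  rw [innerA_eq_findSome, scanSeen_eq_findSome, foldl_seen_findSome, hfun]
  simp only [List.findSome?_nil, Option.none_or]

-- the outer loops agree
theorem outerA_eq_outerB (chords2 : List String) (chords1 : List String) :
    outerA chords2 chords1 = outerB (List.foldl seenStep [] chords2) chords1 := by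
  induction chords1 with
  | nil => rfl
  | cons c rest ih =>
    rw [outerA_cons, outerB_cons, innerA_eq_scanSeen c chords2, ih]

-- ===== VERDICT (by name: the statement is the Claim_ definition above) =====
theorem classify_progression_spec : Claim_equal_classify_progression := by
  intro chords1 chords2 _
  show classify_progression chords1 chords2 = classify_progression_alt chords1 chords2
  unfold classify_progression classify_progression_alt
  rw [outerA_eq_outerB]
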